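-- pv_equiv track=rewrite | github.com/ros-2/Autoemail | src/outreach_bot/contact_finder.py | prioritize_emails
-- ===== SOURCE A (Python) =====
-- EMAIL_PRIORITIES = [
--     'info@',
--     'enquiries@',
--     'enquiry@',
--     'hello@',
--     'contact@',
--     'admin@',
--     'office@',
--     'general@',
--     'sales@',
-- ]
--
-- def prioritize_emails(emails: list) -> list:
--     """
--     Sort emails by priority (info@, enquiries@, etc. first).
--
--     Args:
--         emails: List of email addresses
--
--     Returns:
--         Sorted list with priority emails first
--     """
--     def get_priority(email: str) -> int:
--         email_lower = email.lower()
--         for i, prefix in enumerate(EMAIL_PRIORITIES):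
--             if email_lower.startswith(prefix):
--                 return i
--         return len(EMAIL_PRIORITIES)  # Unknown prefix goes last
--
--     return sorted(emails, key=get_priority)
-- ===== SOURCE B (Python) =====
-- EMAIL_PRIORITIES = [
--     'info@',
--     'enquiries@',
--     'enquiry@',
--     'hello@',
--     'contact@',
--     'admin@',
--     'office@',
--     'general@',
--     'sales@',
-- ]
--
-- def prioritize_emails(emails: list) -> list:
--     """Staged filter passes: for each priority class 0..9 in order, keep the emails of that class."""
--     def priority(email: str) -> int:
--         low = email.lower()
--         return next((i for i, p in enumerate(EMAIL_PRIORITIES) if low.startswith(p)),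
--                     len(EMAIL_PRIORITIES))
--
--     return [e for i in range(len(EMAIL_PRIORITIES) + 1)
--               for e in emails if priority(e) == i]
-- ===== Notes on version B (the rewrite author's own statement) =====
-- stated objective: alternative
-- what changed: Replaces the comparison sort (sorted with a priority key) by staged filter passes: one pass per priority class 0..9 selecting the emails of that class in input order, concatenated; the priority itself is computed as a first-match index (next over enumerate) instead of an explicit indexed loop.
import Mathlib
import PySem

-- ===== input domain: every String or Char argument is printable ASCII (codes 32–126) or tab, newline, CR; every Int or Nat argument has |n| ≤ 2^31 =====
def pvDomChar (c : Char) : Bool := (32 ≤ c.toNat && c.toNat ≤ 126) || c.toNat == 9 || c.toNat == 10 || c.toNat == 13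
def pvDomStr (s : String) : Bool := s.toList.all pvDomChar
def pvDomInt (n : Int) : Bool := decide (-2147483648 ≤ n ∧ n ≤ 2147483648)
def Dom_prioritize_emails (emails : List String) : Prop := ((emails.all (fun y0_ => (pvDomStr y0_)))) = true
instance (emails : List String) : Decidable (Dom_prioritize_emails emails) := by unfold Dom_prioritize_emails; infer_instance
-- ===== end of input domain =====

-- B replaces the comparison sort with staged filter passes, one per priority class (alternative algorithm).

-- shared module constant: EMAIL_PRIORITIES (both Pythons carry the identical constant)
def emailPriorities : List String :=
  ["info@", "enquiries@", "enquiry@", "hello@", "contact@", "admin@", "office@", "general@", "sales@"]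

-- ===== PORT A =====
-- A's nested get_priority: the 'for i, prefix in enumerate(EMAIL_PRIORITIES)' loop threading the index;
-- when the scan is exhausted the counter equals len(EMAIL_PRIORITIES), Python's fallback return
def getPriorityLoop (low : String) : List String → Int → Int
  | [], i => i
  | p :: ps, i => if PySem.Str.startswith low p then i else getPriorityLoop low ps (i + 1)

def getPriority (email : String) : Int :=
  getPriorityLoop (PySem.Str.lower email) emailPriorities 0

def prioritize_emails (emails : List String) : List String :=
  PySem.List.sorted emails (fun e => getPriority e) false

-- ===== PORT B =====
-- B's priority: first-match index, next((i for i, p in enumerate(...) if low.startswith(p)), len(...));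
-- List.findIdx returns the list length when nothing matches, exactly Python's default
def altPriority (email : String) : Int :=
  ((emailPriorities.findIdx (fun p => PySem.Str.startswith (PySem.Str.lower email) p) : Nat) : Int)

-- [e for i in range(len(EMAIL_PRIORITIES) + 1) for e in emails if priority(e) == i]
def prioritize_emails_alt (emails : List String) : List String :=
  (PySem.List.pyRange 0 10 1).flatMap (fun i => emails.filter (fun e => altPriority e == i))

-- ===== PRECONDITION & SPEC =====
def Spec_prioritize_emails (emails : List String) (out : List String) : Prop := out = prioritize_emails_alt emails
instance (emails : List String) (out : List String) : Decidable (Spec_prioritize_emails emails out) := by unfold Spec_prioritize_emails; infer_instance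

-- ===== CLAIM (what is proved, stated in full; the proofs are below) =====
def Claim_equal_prioritize_emails : Prop := ∀ (emails : List String), Dom_prioritize_emails emails → Spec_prioritize_emails emails (prioritize_emails emails)

-- ===== LEMMAS AND PROOFS =====

-- the priority buckets: bucket j holds, in order, the emails of priority j
def pvBucket (xs : List String) (j : Nat) : List String :=
  xs.filter (fun e => decide (getPriority e = (j : Int)))

def pvBuckets (xs : List String) : List (List String) :=
  (List.range 10).map (fun j => pvBucket xs j)

theorem getPriorityLoop_findIdx (low : String) (ps : List String) (i : Int) :
    getPriorityLoop low ps i = i + ((ps.findIdx (fun p => PySem.Str.startswith low p) : Nat) : Int) := by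
  induction ps generalizing i with
  | nil => simp [getPriorityLoop]
  | cons p ps ih =>
    simp only [getPriorityLoop, List.findIdx_cons, PySem.Str.startswith]
    simp only [PySem.Str.startswith] at ih
    by_cases h : PySem.Chars.startswith low.toList p.toList
    · simp [h]
    · simp only [h, Bool.false_eq_true, if_false, cond_false, ih (i + 1)]
      push_cast
      omega

theorem getPriority_eq_alt (e : String) : getPriority e = altPriority e := by
  unfold getPriority altPriority
  rw [getPriorityLoop_findIdx]
  simp

theorem getPriority_bounds (e : String) : 0 ≤ getPriority e ∧ getPriority e < 10 := by
  rw [getPriority_eq_alt]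
  unfold altPriority
  have := List.findIdx_le_length (p := fun p => PySem.Str.startswith (PySem.Str.lower e) p)
    (xs := emailPriorities)
  simp only [emailPriorities, List.length_cons, List.length_nil] at this
  constructor <;> [positivity; exact_mod_cast Nat.lt_succ_of_le this]

theorem pvBuckets_nil : pvBuckets [] = List.replicate 10 ([] : List String) := by
  decide

theorem pvBucket_append_singleton (xs : List String) (x : String) (j : Nat) :
    pvBucket (xs ++ [x]) j =
      pvBucket xs j ++ (if getPriority x = (j : Int) then [x] else []) := by
  simp [pvBucket, List.filter_append, List.filter]
  split_ifs with h <;> simp [h]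

-- inserting before the tail and after the head part
theorem insertBy_middle (before : String → String → Bool) (x : String)
    (P S : List String) (hP : ∀ y ∈ P, before x y = false) (hS : ∀ y ∈ S, before x y = true) :
    PySem.List.insertBy before x (P ++ S) = P ++ x :: S := by
  induction P with
  | nil =>
    cases S with
    | nil => simpa using PySem.List.insertBy_of_forall_not_before before x [] (by simp)
    | cons s ss => simp [PySem.List.insertBy, hS s (by simp)]
  | cons p P ih =>
    have hp : before x p = false := hP p (by simp)
    simp only [List.cons_append, PySem.List.insertBy, hp]
    simp [ih (fun y hy => hP y (by simp [hy]))]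

theorem mem_flatten_buckets_lo (xs : List String) (y : String) (m : Nat)
    (hy : y ∈ (((List.range m).map (fun j => pvBucket xs j)).flatten)) :
    getPriority y < m := by
  simp only [List.mem_flatten, List.mem_map, List.mem_range] at hy
  obtain ⟨l, ⟨j, hj, rfl⟩, hmem⟩ := hy
  have := (List.mem_filter.mp hmem).2
  simp at this
  omega

-- the A-side step: inserting x into the flattened buckets appends it to its bucket
theorem insert_flatten_step (xs : List String) (x : String) :
    PySem.List.insertBy (fun a b => decide (getPriority a < getPriority b)) x
        (pvBuckets xs).flatten = (pvBuckets (xs ++ [x])).flatten := by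
  obtain ⟨h0, h10⟩ := getPriority_bounds x
  set kn : Nat := (getPriority x).toNat with hkn
  have hkx : getPriority x = (kn : Int) := by omega
  have hsplit : 10 = (kn + 1) + (9 - kn) := by omega
  unfold pvBuckets
  rw [hsplit, List.range_add, List.range_succ]
  simp only [List.map_append, List.map_map, List.flatten_append, List.map_cons, List.map_nil,
    List.flatten_cons, List.flatten_nil, List.append_nil]
  have hlo : List.map (fun j => pvBucket (xs ++ [x]) j) (List.range kn)
      = List.map (fun j => pvBucket xs j) (List.range kn) := by
    apply List.map_congr_left
    intro j hj
    have hjk : j < kn := List.mem_range.mp hj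
    rw [pvBucket_append_singleton]
    have : ¬ getPriority x = (j : Int) := by omega
    simp [this]
  have htail : List.map ((fun j => pvBucket (xs ++ [x]) j) ∘ fun t => kn + 1 + t) (List.range (9 - kn))
      = List.map ((fun j => pvBucket xs j) ∘ fun t => kn + 1 + t) (List.range (9 - kn)) := by
    apply List.map_congr_left
    intro j hj
    simp only [Function.comp]
    rw [pvBucket_append_singleton]
    have h2 : ¬ getPriority x = (kn : Int) + 1 + (j : Int) := by omega
    simp [h2]
  rw [hlo, htail, pvBucket_append_singleton, hkx]
  rw [insertBy_middle _ x
        ((List.map (fun j => pvBucket xs j) (List.range kn)).flatten ++ pvBucket xs kn) _ ?_ ?_]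
  · simp [List.append_assoc]
  · intro y hy
    rcases List.mem_append.mp hy with h1 | h2
    · have := mem_flatten_buckets_lo xs y kn h1
      simp only [decide_eq_false_iff_not, not_lt]
      omega
    · have := (List.mem_filter.mp h2).2
      simp at this
      simp only [decide_eq_false_iff_not, not_lt]
      omega
  · intro y hy
    simp only [List.mem_flatten, List.mem_map, List.mem_range, Function.comp] at hy
    obtain ⟨l, ⟨j, hj, rfl⟩, hmem⟩ := hy
    have := (List.mem_filter.mp hmem).2
    simp at this
    simp only [decide_eq_true_eq]
    omega

theorem sorted_eq_flatten_buckets (xs : List String) :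
    PySem.List.sorted xs (fun e => getPriority e) false = (pvBuckets xs).flatten := by
  rw [PySem.List.sorted_eq_foldl_insertBy]
  induction xs using List.reverseRecOn with
  | nil => rw [pvBuckets_nil]; rfl
  | append_singleton xs x ih =>
    rw [List.foldl_append, List.foldl_cons, List.foldl_nil, ih]
    exact insert_flatten_step xs x

-- B's staged filter passes produce exactly the flattened buckets
theorem alt_eq_flatten_buckets (xs : List String) :
    prioritize_emails_alt xs = (pvBuckets xs).flatten := by
  have hfil : ∀ (i : Int), xs.filter (fun e => altPriority e == i)
      = xs.filter (fun e => decide (getPriority e = i)) := by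
    intro i
    apply List.filter_congr
    intro e _
    rw [getPriority_eq_alt]
    by_cases h : altPriority e = i <;> simp [h]
  have hrange : PySem.List.pyRange 0 10 1 = ([0,1,2,3,4,5,6,7,8,9] : List Int) := by decide
  have hr10 : List.range 10 = [0,1,2,3,4,5,6,7,8,9] := by decide
  unfold prioritize_emails_alt pvBuckets pvBucket
  rw [hrange, hr10]
  simp only [List.flatMap_cons, List.flatMap_nil, List.map_cons, List.map_nil,
    List.flatten_cons, List.flatten_nil, List.append_nil, hfil]
  norm_num

-- ===== VERDICT (by name: the statement is the Claim_ definition above) =====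
theorem prioritize_emails_spec : Claim_equal_prioritize_emails := by
  intro emails _
  unfold Spec_prioritize_emails prioritize_emails
  rw [alt_eq_flatten_buckets]
  exact sorted_eq_flatten_buckets emails
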